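-- pv_equiv track=rewrite | github.com/ebb-earl-co/tidal-wave | tidal_wave/requesting.py | http_request_range_headers
-- ===== SOURCE A (Python) =====
-- from typing import Callable, Iterable, Iterator, Optional, Tuple, Union
--
-- def contiguous_ranges(value: int, range_size: int) -> Iterator[Tuple[int, int]]:
--     """This function is a generator: it yields two-tuples of int, with the
--     tuples representing the (inclusive) boundaries of ranges of size
--     range_size. The final tuple will represent a range <= range_size if
--     range_size does not evenly divide value. E.g.
--     ```>>> list(ranges(16, 3))
--     [(0, 2), (3, 5), (6, 8), (9, 11), (12, 14), (15, 16)]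
--     ```
--     N.b. the first tuple will always have first element 0 and the final tuple
--     will always have second element `value`."""
--     i: int = 0
--     rs: int = range_size - 1
--     while i + rs < value:
--         t: Tuple[int, int] = (i, i + rs)
--         i = t[-1] + 1
--         yield t
--     else:
--         yield (i, value)
--
-- def http_request_range_headers(
--     content_length: int, range_size: int, return_tuple: bool = True
-- ) -> Iterable[str]:
--     """This function creates HTTP request Range headers. Its iterable
--     returned is of tuples; each tuple describes the (inclusive) boundaries
--     of a bytes range with size range_size. If return_tuple is False, it returns
--     a generator of tuples. E.g.
--     ```>>> http_request_range_headers(16, 3)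
--     ('bytes=0-2',
--      'bytes=3-5',
--      'bytes=6-8',
--      'bytes=9-11',
--      'bytes=12-14',
--      'bytes=15-16')
--     ```
--     """
--     ranges: Iterator[Tuple[int, int]] = contiguous_ranges(content_length, range_size)
--     iterable: Iterable = (f"bytes={t[0]}-{t[1]}" for t in ranges)
--     if return_tuple:
--         return tuple(iterable)
--     else:
--         return iterable
-- ===== SOURCE B (Python) =====
-- def http_request_range_headers(content_length, range_size, return_tuple=True):
--     # count-first closed form: number of headers, then one uniform comprehension
--     n = max(content_length, 0) // range_size + 1
--     iterable = (
--         f"bytes={k * range_size}-{min(k * range_size + range_size - 1, content_length)}"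
--         for k in range(n)
--     )
--     return tuple(iterable) if return_tuple else iterable
-- ===== Notes on version B (the rewrite author's own statement) =====
-- stated objective: simpler
-- what changed: Replaces A's while/else generator that accumulates range tuples step by step with a closed-form chunk count (max(content_length,0)//range_size + 1) and one uniform min-clamped comprehension over range(n).
-- outside the precondition, e.g. on http_request_range_headers(-5, 0, True): A returns ('bytes=0--5',), B raises ZeroDivisionError
import Mathlib
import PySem

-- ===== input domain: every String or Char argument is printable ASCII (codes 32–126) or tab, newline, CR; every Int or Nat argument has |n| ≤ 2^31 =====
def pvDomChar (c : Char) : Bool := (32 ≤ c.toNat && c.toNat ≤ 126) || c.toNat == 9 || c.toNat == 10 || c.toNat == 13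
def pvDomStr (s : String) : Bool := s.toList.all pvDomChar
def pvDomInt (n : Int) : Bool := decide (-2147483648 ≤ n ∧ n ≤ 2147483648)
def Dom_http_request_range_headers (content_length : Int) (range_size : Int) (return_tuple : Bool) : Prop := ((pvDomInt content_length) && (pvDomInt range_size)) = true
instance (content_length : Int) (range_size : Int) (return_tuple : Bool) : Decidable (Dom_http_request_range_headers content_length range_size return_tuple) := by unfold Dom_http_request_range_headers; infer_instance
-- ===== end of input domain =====

-- B replaces A's while-loop generator by a closed-form chunk count and one uniform
-- min-clamped comprehension (objective: simpler). Equivalence is about the returned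
-- sequence of header strings; with return_tuple=False both Pythons return a lazy
-- generator producing that same sequence.

-- ===== PORT A =====
-- the while/else loop of contiguous_ranges; fuel = value.toNat + 1 suffices inside
-- Pre_ (each iteration advances i by range_size ≥ 1 while i + rs < value)
def pvContiguousLoop (fuel : Nat) (i : Int) (value : Int) (rs : Int) : List (Int × Int) :=
  match fuel with
  | 0 => [(i, value)]
  | Nat.succ f =>
    if i + rs < value then (i, i + rs) :: pvContiguousLoop f (i + rs + 1) value rs
    else [(i, value)]

def contiguous_ranges (value : Int) (range_size : Int) : List (Int × Int) :=
  pvContiguousLoop (value.toNat + 1) 0 value (range_size - 1)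

def http_request_range_headers (content_length : Int) (range_size : Int) (return_tuple : Bool) : List String :=
  let ranges := contiguous_ranges content_length range_size
  let iterable := ranges.map (fun t =>
    "bytes=" ++ PySem.Int.toStr t.1 ++ "-" ++ PySem.Int.toStr t.2)
  if return_tuple then iterable else iterable  -- tuple vs generator: same sequence

-- ===== PORT B =====
def http_request_range_headers_alt (content_length : Int) (range_size : Int) (return_tuple : Bool) : List String :=
  let n := PySem.Int.floordiv (max content_length 0) range_size + 1
  let iterable := (PySem.List.pyRange 0 n 1).map (fun k =>
    "bytes=" ++ PySem.Int.toStr (k * range_size) ++ "-" ++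
      PySem.Int.toStr (min (k * range_size + range_size - 1) content_length))
  if return_tuple then iterable else iterable  -- tuple vs generator: same sequence

-- ===== PRECONDITION & SPEC =====
-- Pre_ excludes range_size ≤ 0 with range_size ≤ content_length, where A's while-loop
-- never terminates, and range_size = 0 (there A returns a single header when
-- content_length < 0, but B's closed-form chunk count divides by zero and raises).
def Pre_http_request_range_headers (content_length : Int) (range_size : Int) (return_tuple : Bool) : Prop :=
  1 ≤ range_size ∨ (range_size ≤ -1 ∧ content_length < range_size)
instance (content_length : Int) (range_size : Int) (return_tuple : Bool) : Decidable (Pre_http_request_range_headers content_length range_size return_tuple) := by unfold Pre_http_request_range_headers; infer_instance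

def pvWitness_http_request_range_headers : Int × Int × Bool := (16, 3, true)

def Spec_http_request_range_headers (content_length : Int) (range_size : Int) (return_tuple : Bool) (out : List String) : Prop := out = http_request_range_headers_alt content_length range_size return_tuple
instance (content_length : Int) (range_size : Int) (return_tuple : Bool) (out : List String) : Decidable (Spec_http_request_range_headers content_length range_size return_tuple out) := by unfold Spec_http_request_range_headers; infer_instance

-- ===== CLAIM (what is proved, stated in full; the proofs are below) =====
def Claim_equal_http_request_range_headers : Prop := ∀ (content_length : Int) (range_size : Int) (return_tuple : Bool), Dom_http_request_range_headers content_length range_size return_tuple → Pre_http_request_range_headers content_length range_size return_tuple → Spec_http_request_range_headers content_length range_size return_tuple (http_request_range_headers content_length range_size return_tuple)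

-- ===== LEMMAS AND PROOFS =====

-- A's loop from position i, characterised as a map over an index range (1 ≤ rsz).
theorem pvLoop_eq (rsz : Int) (h : 1 ≤ rsz) :
    ∀ (fuel : Nat) (i value : Int), value - i ≤ (fuel : Int) →
    pvContiguousLoop fuel i value (rsz - 1) =
      (List.range ((PySem.Int.floordiv (max (value - i) 0) rsz).toNat + 1)).map
        (fun (k : Nat) => (i + (k : Int) * rsz, min (i + (k : Int) * rsz + rsz - 1) value)) := by
  intro fuel
  induction fuel with
  | zero =>
    intro i value hv
    have hmax : max (value - i) 0 = 0 := by omega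
    have hfd : PySem.Int.floordiv (0 : Int) rsz = 0 := by
      rw [PySem.Int.floordiv_eq_ediv_of_pos (by omega)]; simp
    have hr : List.range (0 + 1) = [0] := rfl
    simp only [pvContiguousLoop, hmax, hfd, Int.toNat_zero, hr,
      List.map_cons, List.map_nil, Nat.cast_zero, zero_mul, add_zero]
    rw [min_eq_right (by omega)]
  | succ f ih =>
    intro i value hv
    by_cases hc : i + (rsz - 1) < value
    · have hge : rsz ≤ value - i := by omega
      have hmax : max (value - i) 0 = value - i := by omega
      have hmax2 : max (value - (i + rsz)) 0 = value - i - rsz := by omega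
      have hsplit : PySem.Int.floordiv (value - i) rsz
          = PySem.Int.floordiv (value - i - rsz) rsz + 1 := by
        rw [PySem.Int.floordiv_eq_ediv_of_pos (by omega),
            PySem.Int.floordiv_eq_ediv_of_pos (by omega)]
        have he : value - i = (value - i - rsz) + 1 * rsz := by ring
        rw [he, Int.add_mul_ediv_right _ _ (by omega)]
        ring_nf
      have hnn : 0 ≤ PySem.Int.floordiv (value - i - rsz) rsz := by
        rw [PySem.Int.floordiv_eq_ediv_of_pos (by omega)]
        exact Int.ediv_nonneg (by omega) (by omega)
      have hnat : (PySem.Int.floordiv (max (value - i) 0) rsz).toNat + 1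
          = ((PySem.Int.floordiv (max (value - (i + rsz)) 0) rsz).toNat + 1) + 1 := by
        rw [hmax, hmax2, hsplit]; omega
      have hiheq := ih (i + rsz) value (by push_cast at hv ⊢; omega)
      simp only [pvContiguousLoop, if_pos hc]
      have harg : i + (rsz - 1) + 1 = i + rsz := by ring
      rw [harg, hiheq, hnat]
      conv_rhs => rw [List.range_succ_eq_map, List.map_cons, List.map_map]
      rw [List.cons.injEq]
      refine ⟨?_, ?_⟩
      · simp only [Nat.cast_zero, zero_mul, add_zero, Prod.mk.injEq]
        rw [min_eq_left (by omega)]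
        exact ⟨trivial, by ring⟩
      · apply List.map_congr_left
        intro k _
        simp only [Function.comp_apply, Prod.mk.injEq]
        constructor
        · push_cast; ring
        · congr 1; push_cast; ring
    · have hfd : PySem.Int.floordiv (max (value - i) 0) rsz = 0 := by
        rw [PySem.Int.floordiv_eq_ediv_of_pos (by omega)]
        exact Int.ediv_eq_zero_of_lt (by omega) (by omega)
      have hr : List.range (0 + 1) = [0] := rfl
      simp only [pvContiguousLoop, if_neg hc, hfd, Int.toNat_zero, hr,
        List.map_cons, List.map_nil, Nat.cast_zero, zero_mul, add_zero]
      rw [min_eq_right (by omega)]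

-- the two header lists agree (the common body of both ports' branches)
theorem pvBody (content_length range_size : Int)
    (h : Pre_http_request_range_headers content_length range_size true) :
    (contiguous_ranges content_length range_size).map (fun t =>
        "bytes=" ++ PySem.Int.toStr t.1 ++ "-" ++ PySem.Int.toStr t.2)
    = (PySem.List.pyRange 0 (PySem.Int.floordiv (max content_length 0) range_size + 1) 1).map
        (fun k => "bytes=" ++ PySem.Int.toStr (k * range_size) ++ "-" ++
          PySem.Int.toStr (min (k * range_size + range_size - 1) content_length)) := by
  rcases h with h1 | ⟨h1, h2⟩
  · have hfuel : content_length - 0 ≤ ((content_length.toNat + 1 : Nat) : Int) := by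
      push_cast; omega
    have hloop := pvLoop_eq range_size h1 (content_length.toNat + 1) 0 content_length hfuel
    have hnn : 0 ≤ PySem.Int.floordiv (max content_length 0) range_size := by
      rw [PySem.Int.floordiv_eq_ediv_of_pos (by omega)]
      exact Int.ediv_nonneg (by omega) (by omega)
    simp only [sub_zero] at hloop
    rw [contiguous_ranges, hloop, List.map_map, PySem.List.pyRange_one, List.map_map]
    have hcount : (PySem.Int.floordiv (max content_length 0) range_size + 1 - 0).toNat
        = (PySem.Int.floordiv (max content_length 0) range_size).toNat + 1 := by
      omega
    rw [hcount]
    apply List.map_congr_left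
    intro k _
    simp only [Function.comp_apply, zero_add]
  · -- range_size ≤ -1 and content_length < range_size: single (0, content_length) header
    have htn : content_length.toNat = 0 := by omega
    have hfd : PySem.Int.floordiv (max content_length 0) range_size = 0 := by
      have hm : max content_length 0 = 0 := by omega
      rw [hm]
      have hid := PySem.Int.floordiv_mul_add_mod (0 : Int) range_size
      have hmod : PySem.Int.mod (0 : Int) range_size = 0 :=
        (PySem.Int.mod_eq_zero_iff_dvd 0 range_size).mpr ⟨0, by ring⟩
      rw [hmod, add_zero] at hid
      rcases mul_eq_zero.mp hid with h | h
      · exact h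
      · omega
    have hone : PySem.List.pyRange 0 (PySem.Int.floordiv (max content_length 0) range_size + 1) 1
        = [0] := by
      rw [hfd]
      rw [PySem.List.pyRange_one]
      decide
    rw [contiguous_ranges, htn, hone]
    have hstep : pvContiguousLoop (0 + 1) 0 content_length (range_size - 1)
        = [(0, content_length)] := by
      simp only [pvContiguousLoop]
      rw [if_neg (by omega)]
    rw [hstep]
    simp only [List.map_cons, List.map_nil, zero_mul, zero_add]
    rw [min_eq_right (by omega)]

-- ===== VERDICT (by name: the statement is the Claim_ definition above) =====
theorem http_request_range_headers_spec : Claim_equal_http_request_range_headers := by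
  intro content_length range_size return_tuple _ hpre
  unfold Spec_http_request_range_headers
  simp only [http_request_range_headers, http_request_range_headers_alt]
  rw [pvBody content_length range_size hpre]
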